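-- pv_equiv track=rewrite | github.com/mbashia/GAME_0F_BAGELS_PYTHON_PRACTICE | bagels.py | generate_clues
-- ===== SOURCE A (Python) =====
-- def generate_clues(guess, secretnumber):
--     clues = []
--     for i in range(len(guess)):
--         if guess[i] == secretnumber[i]:
--             clues.append("fermini")
--         elif guess[i] in secretnumber:
--             clues.append("pico")
--         clues.sort()
--
--     if len(clues)==0:
--         return "bagels"
--
--     return " ".join(clues)
-- ===== SOURCE B (Python) =====
-- def generate_clues(guess, secretnumber):
--     f = sum(g == s for g, s in zip(guess, secretnumber))
--     p = sum(g in secretnumber for g in guess) - f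
--     clues = ["fermini"] * f + ["pico"] * p
--     return " ".join(clues) if clues else "bagels"
-- ===== Notes on version B (the rewrite author's own statement) =====
-- stated objective: simpler
-- what changed: Replaces A's single branching loop that appends to and repeatedly re-sorts a clue list with two staged aggregations and a subtraction: count exact matches over zip(guess, secretnumber), count membership hits over guess, derive picos as hits minus matches, and build the sorted output directly since 'fermini' sorts before 'pico'.
import Mathlib
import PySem

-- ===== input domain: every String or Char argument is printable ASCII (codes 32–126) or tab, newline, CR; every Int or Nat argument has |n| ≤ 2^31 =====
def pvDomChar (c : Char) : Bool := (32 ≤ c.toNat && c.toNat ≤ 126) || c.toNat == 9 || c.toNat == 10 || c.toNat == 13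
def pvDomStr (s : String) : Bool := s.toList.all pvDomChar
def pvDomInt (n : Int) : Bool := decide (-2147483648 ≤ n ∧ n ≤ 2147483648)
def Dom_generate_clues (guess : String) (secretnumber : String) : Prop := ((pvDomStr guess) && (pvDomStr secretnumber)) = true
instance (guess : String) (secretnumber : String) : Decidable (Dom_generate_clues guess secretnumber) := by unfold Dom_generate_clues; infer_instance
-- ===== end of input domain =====

-- B replaces A's append-and-re-sort clue loop with staged counts (zip matches, membership hits) and a subtraction (simpler; return value only).


-- ===== PORT A =====
-- 'guess[i] in secretnumber' is a one-character substring test: ported as PySem.Chars.isIn [c] on code points (exact).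
def generate_clues (guess : String) (secretnumber : String) : String :=
  let clues := (PySem.List.pyRange 0 (PySem.Str.len guess) 1).foldl
    (fun clues i =>
      let clues :=
        if PySem.Str.pyGet? guess i = PySem.Str.pyGet? secretnumber i then clues ++ ["fermini"]
        else if (match PySem.Str.pyGet? guess i with
                 | some c => PySem.Chars.isIn [c] secretnumber.toList
                 | none => false) then clues ++ ["pico"]
        else clues
      PySem.List.sorted clues (fun x => x) false) []
  if clues.length = 0 then "bagels" else PySem.Str.join " " clues

-- ===== PORT B =====
def generate_clues_alt (guess : String) (secretnumber : String) : String :=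
  let f : Int := ((guess.toList.zip secretnumber.toList).map
    (fun gs => if gs.1 = gs.2 then (1 : Int) else 0)).sum
  let p : Int := ((guess.toList.map
    (fun g => if PySem.Chars.isIn [g] secretnumber.toList then (1 : Int) else 0)).sum) - f
  let clues := List.replicate f.toNat "fermini" ++ List.replicate p.toNat "pico"
  if clues ≠ [] then PySem.Str.join " " clues else "bagels"

-- ===== PRECONDITION & SPEC =====
-- Pre_ excludes exactly the inputs where guess is longer than secretnumber, on which Python A
-- raises IndexError at secretnumber[i].
def Pre_generate_clues (guess : String) (secretnumber : String) : Prop :=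
  PySem.Str.len guess ≤ PySem.Str.len secretnumber
instance (guess : String) (secretnumber : String) : Decidable (Pre_generate_clues guess secretnumber) := by
  unfold Pre_generate_clues; infer_instance

def pvWitness_generate_clues : String × String := ("123", "321")

def Spec_generate_clues (guess : String) (secretnumber : String) (out : String) : Prop := out = generate_clues_alt guess secretnumber
instance (guess : String) (secretnumber : String) (out : String) : Decidable (Spec_generate_clues guess secretnumber out) := by unfold Spec_generate_clues; infer_instance

-- ===== CLAIM (what is proved, stated in full; the proofs are below) =====
def Claim_equal_generate_clues : Prop := ∀ (guess : String) (secretnumber : String), Dom_generate_clues guess secretnumber → Pre_generate_clues guess secretnumber → Spec_generate_clues guess secretnumber (generate_clues guess secretnumber)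

-- ===== LEMMAS AND PROOFS =====

-- the clue-list shape A's loop maintains: f "fermini"s followed by p "pico"s
def pvShape (f p : Nat) : List String :=
  List.replicate f "fermini" ++ List.replicate p "pico"

-- A's positional tests, as predicates on the index
def pvA1 (guess secretnumber : String) (i : Int) : Bool :=
  decide (PySem.Str.pyGet? guess i = PySem.Str.pyGet? secretnumber i)
def pvA2 (guess secretnumber : String) (i : Int) : Bool :=
  !pvA1 guess secretnumber i &&
    (match PySem.Str.pyGet? guess i with
     | some c => PySem.Chars.isIn [c] secretnumber.toList
     | none => false)

lemma pv_fermini_le_pico : "fermini" ≤ "pico" :=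
  le_of_lt (by rw [String.lt_iff_toList_lt]; decide)

lemma pvShape_pairwise (f p : Nat) : (pvShape f p).Pairwise (fun a b => a ≤ b) := by
  unfold pvShape
  refine List.pairwise_append.mpr ⟨List.pairwise_replicate.mpr (Or.inr le_rfl),
    List.pairwise_replicate.mpr (Or.inr le_rfl), ?_⟩
  intro a ha b hb
  rw [List.eq_of_mem_replicate ha, List.eq_of_mem_replicate hb]
  exact pv_fermini_le_pico

lemma pvSort_shape (f p : Nat) :
    PySem.List.sorted (pvShape f p) (fun x => x) false = pvShape f p :=
  PySem.List.sorted_eq_self_of_pairwise _ _ (pvShape_pairwise f p)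

lemma pvSort_shape_fermini (f p : Nat) :
    PySem.List.sorted (pvShape f p ++ ["fermini"]) (fun x => x) false = pvShape (f + 1) p := by
  apply PySem.List.sorted_id_eq_of_perm_of_pairwise
  · unfold pvShape
    rw [List.replicate_succ', List.append_assoc, List.append_assoc]
    exact List.Perm.append_left _ List.perm_append_comm
  · exact pvShape_pairwise (f + 1) p

lemma pvSort_shape_pico (f p : Nat) :
    PySem.List.sorted (pvShape f p ++ ["pico"]) (fun x => x) false = pvShape f (p + 1) := by
  apply PySem.List.sorted_id_eq_of_perm_of_pairwise
  · unfold pvShape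
    rw [List.replicate_succ', List.append_assoc]
  · exact pvShape_pairwise f (p + 1)

-- A's loop computes the shape whose counts are the countP of its two tests
lemma pvLoopA (guess secretnumber : String) (L : List Int) :
    ∀ (f p : Nat),
      L.foldl
        (fun clues i =>
          let clues :=
            if PySem.Str.pyGet? guess i = PySem.Str.pyGet? secretnumber i then clues ++ ["fermini"]
            else if (match PySem.Str.pyGet? guess i with
                     | some c => PySem.Chars.isIn [c] secretnumber.toList
                     | none => false) then clues ++ ["pico"]
            else clues
          PySem.List.sorted clues (fun x => x) false) (pvShape f p)
      = pvShape (f + L.countP (pvA1 guess secretnumber)) (p + L.countP (pvA2 guess secretnumber)) := by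
  induction L with
  | nil => intro f p; simp
  | cons i L ih =>
    intro f p
    have hT : (if (true : Bool) = true then (1 : Nat) else 0) = 1 := rfl
    have hF : (if (false : Bool) = true then (1 : Nat) else 0) = 0 := rfl
    simp only [List.foldl_cons]
    by_cases h1 : PySem.Str.pyGet? guess i = PySem.Str.pyGet? secretnumber i
    · have e1 : pvA1 guess secretnumber i = true := by unfold pvA1; exact decide_eq_true h1
      have e2 : pvA2 guess secretnumber i = false := by
        simp only [pvA2, e1, Bool.not_true, Bool.false_and]
      show List.foldl _ (PySem.List.sorted (if _ = _ then pvShape f p ++ ["fermini"] else _) (fun x => x) false) L = _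
      rw [if_pos h1, pvSort_shape_fermini, ih, List.countP_cons, List.countP_cons, e1, e2, hT, hF]
      congr 1
      omega
    · have e1 : pvA1 guess secretnumber i = false := by unfold pvA1; exact decide_eq_false h1
      by_cases h2 : (match PySem.Str.pyGet? guess i with
                     | some c => PySem.Chars.isIn [c] secretnumber.toList
                     | none => false) = true
      · have e2 : pvA2 guess secretnumber i = true := by
          simp only [pvA2, e1, Bool.not_false, Bool.true_and]; exact h2
        show List.foldl _ (PySem.List.sorted (if _ = _ then _ else if _ then pvShape f p ++ ["pico"] else _) (fun x => x) false) L = _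
        rw [if_neg h1, if_pos h2, pvSort_shape_pico, ih, List.countP_cons, List.countP_cons, e1, e2, hT, hF]
        congr 1
        omega
      · have e2 : pvA2 guess secretnumber i = false := by
          simp only [pvA2, e1, Bool.not_false, Bool.true_and]
          exact Bool.eq_false_iff.mpr h2
        show List.foldl _ (PySem.List.sorted (if _ = _ then _ else if _ then _ else pvShape f p) (fun x => x) false) L = _
        rw [if_neg h1, if_neg h2, pvSort_shape, ih, List.countP_cons, List.countP_cons, e1, e2, hF]
        congr 1

-- counting over pyRange 0 n 1 is counting over List.range n
lemma pvRangeCount (n : Nat) (q : Int → Bool) :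
    (PySem.List.pyRange 0 (n : Int) 1).countP q
      = List.countP (fun k : Nat => q (k : Int)) (List.range n) := by
  rw [PySem.List.pyRange_one, List.countP_map]
  have h : (((n : Int)) - 0).toNat = n := by omega
  rw [h]
  exact List.countP_congr (fun k _ => by simp)

-- [c] is a substring iff c is a member
lemma pvSingletonIsIn (c : Char) (l : List Char) :
    PySem.Chars.isIn [c] l = decide (c ∈ l) := by
  by_cases h : c ∈ l
  · obtain ⟨s, t, ht⟩ := List.append_of_mem h
    have : [c] <:+: l := ⟨s, t, by simp [ht]⟩
    simp [h, (PySem.Chars.isIn_iff_infix [c] l).mpr this]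
  · have : ¬ [c] <:+: l := fun hin => h (hin.subset (by simp))
    have hf : PySem.Chars.isIn [c] l = false := by
      cases hb : PySem.Chars.isIn [c] l
      · rfl
      · exact absurd ((PySem.Chars.isIn_iff_infix [c] l).mp hb) this
    simp [h, hf]

-- counting positions whose element satisfies q is counting elements satisfying q
lemma pvMemCount {α : Type} (gl : List α) (q : α → Bool) :
    (List.range gl.length).countP
      (fun k => match gl[k]? with | some c => q c | none => false) = gl.countP q := by
  induction gl with
  | nil => simp
  | cons g gl ih =>
    rw [List.length_cons, List.range_succ_eq_map, List.countP_cons, List.countP_map]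
    simp only [Function.comp_def, Nat.succ_eq_add_one, List.getElem?_cons_succ,
      List.getElem?_cons_zero]
    rw [ih, List.countP_cons]
    rfl

-- a count of a disjunction of disjoint tests splits
lemma pvSplitCount {α : Type} (l : List α) (p q : α → Bool)
    (hd : ∀ a ∈ l, p a = true → q a = false) :
    l.countP (fun a => p a || q a) = l.countP p + l.countP q := by
  induction l with
  | nil => simp
  | cons a l ih =>
    simp only [List.countP_cons]
    rw [ih (fun b hb => hd b (List.mem_cons_of_mem a hb))]
    by_cases hp : p a = true
    · have := hd a (List.mem_cons_self) hp
      simp [hp, this]; omega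
    · simp only [Bool.not_eq_true] at hp
      simp [hp]; omega

-- the zip-count of B is the count of A's first test
lemma pvZipCount : ∀ (gl sl : List Char), gl.length ≤ sl.length →
    (List.range gl.length).countP (fun k => decide ((gl[k]? : Option Char) = sl[k]?))
      = (gl.zip sl).countP (fun gs => decide (gs.1 = gs.2)) := by
  intro gl
  induction gl with
  | nil => intro sl _; simp
  | cons g gl ih =>
    intro sl hlen
    cases sl with
    | nil => simp at hlen
    | cons s sl =>
      rw [List.length_cons, List.range_succ_eq_map, List.countP_cons, List.countP_map,
        List.zip_cons_cons, List.countP_cons]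
      simp only [Function.comp_def, Nat.succ_eq_add_one, List.getElem?_cons_succ,
        List.getElem?_cons_zero, Option.some.injEq]
      exact Nat.add_right_cancel_iff.mpr (ih sl (by simpa using hlen))

-- B's membership count splits into A's two counts (when secretnumber is long enough)
lemma pvHitsCount (gl sl : List Char) (hlen : gl.length ≤ sl.length) :
    gl.countP (fun g => PySem.Chars.isIn [g] sl)
      = (List.range gl.length).countP
          (fun k => decide ((gl[k]? : Option Char) = sl[k]?))
        + (List.range gl.length).countP
          (fun k => !decide ((gl[k]? : Option Char) = sl[k]?) &&
            (match gl[k]? with | some c => PySem.Chars.isIn [c] sl | none => false)) := by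
  rw [← pvMemCount gl (fun g => PySem.Chars.isIn [g] sl)]
  rw [← pvSplitCount _ _ _ (by intro k _ hp; simp [hp])]
  apply List.countP_congr
  intro k hk
  rw [List.mem_range] at hk
  have hg : gl[k]? = some gl[k] := List.getElem?_eq_getElem hk
  have hs : sl[k]? = some sl[k] := List.getElem?_eq_getElem (lt_of_lt_of_le hk hlen)
  simp only [hg, hs, Option.some.injEq, pvSingletonIsIn]
  by_cases he : gl[k] = sl[k]
  · simp [he]
  · simp [he]

-- ===== VERDICT (by name: the statement is the Claim_ definition above) =====
theorem generate_clues_spec : Claim_equal_generate_clues := by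
  intro guess secretnumber _ hpre
  unfold Spec_generate_clues generate_clues generate_clues_alt
  unfold Pre_generate_clues at hpre
  rw [PySem.Str.len_eq, PySem.Str.len_eq] at hpre
  have hlen : guess.toList.length ≤ secretnumber.toList.length := by exact_mod_cast hpre
  -- A's loop
  have hA := pvLoopA guess secretnumber (PySem.List.pyRange 0 (PySem.Str.len guess) 1) 0 0
  simp only [Nat.zero_add] at hA
  have h0 : pvShape 0 0 = ([] : List String) := rfl
  rw [h0] at hA
  rw [hA]
  -- identify A's counts with B's
  have hq1 : ∀ k : Nat, pvA1 guess secretnumber (k : Int)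
      = decide ((guess.toList[k]? : Option Char) = secretnumber.toList[k]?) := by
    intro k; simp [pvA1, PySem.Str.pyGet?_eq]
  have hq2 : ∀ k : Nat, pvA2 guess secretnumber (k : Int)
      = (!decide ((guess.toList[k]? : Option Char) = secretnumber.toList[k]?) &&
          (match guess.toList[k]? with
           | some c => PySem.Chars.isIn [c] secretnumber.toList | none => false)) := by
    intro k; simp [pvA2, pvA1, PySem.Str.pyGet?_eq]
  have hlenE : PySem.Str.len guess = (guess.toList.length : Int) := PySem.Str.len_eq guess
  rw [hlenE, pvRangeCount, pvRangeCount] at hA ⊢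
  set F := List.countP
    (fun k : Nat => decide ((guess.toList[k]? : Option Char) = secretnumber.toList[k]?))
    (List.range guess.toList.length) with hF
  set P := List.countP
    (fun k : Nat => !decide ((guess.toList[k]? : Option Char) = secretnumber.toList[k]?) &&
      (match guess.toList[k]? with
       | some c => PySem.Chars.isIn [c] secretnumber.toList | none => false))
    (List.range guess.toList.length) with hP
  have hcF : List.countP (fun k : Nat => pvA1 guess secretnumber (k : Int)) (List.range guess.toList.length) = F := by
    rw [hF]; exact List.countP_congr (fun k _ => by rw [hq1 k])
  have hcP : List.countP (fun k : Nat => pvA2 guess secretnumber (k : Int)) (List.range guess.toList.length) = P := by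
    rw [hP]; exact List.countP_congr (fun k _ => by rw [hq2 k])
  rw [hcF, hcP]
  -- B's two sums
  have hBf : ((guess.toList.zip secretnumber.toList).map
      (fun gs => if gs.1 = gs.2 then (1 : Int) else 0)).sum = (F : Int) := by
    have := PySem.List.sum_map_ite_one_zero (fun gs : Char × Char => decide (gs.1 = gs.2))
      (guess.toList.zip secretnumber.toList)
    simp only [decide_eq_true_eq] at this
    rw [this, hF, pvZipCount guess.toList secretnumber.toList hlen]
  have hBh : ((guess.toList.map
      (fun g => if PySem.Chars.isIn [g] secretnumber.toList then (1 : Int) else 0)).sum)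
      = ((F + P : Nat) : Int) := by
    have := PySem.List.sum_map_ite_one_zero
      (fun g : Char => PySem.Chars.isIn [g] secretnumber.toList) guess.toList
    simp only at this
    rw [this, pvHitsCount guess.toList secretnumber.toList hlen, ← hF, ← hP]
  have hpt : (((F + P : Nat) : Int) - ((F : Nat) : Int)).toNat = P := by push_cast; omega
  have hft : (((F : Nat) : Int)).toNat = F := Int.toNat_natCast F
  show (if (pvShape F P).length = 0 then "bagels" else PySem.Str.join " " (pvShape F P)) = _
  dsimp only
  rw [hBf, hBh, hpt, hft]
  -- the two final branches coincide
  by_cases hz : F + P = 0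
  · have hF0 : F = 0 := Nat.eq_zero_of_add_eq_zero_right hz
    have hP0 : P = 0 := Nat.eq_zero_of_add_eq_zero_left hz
    rw [hF0, hP0]
    simp [pvShape]
  · have hlenS : (pvShape F P).length = F + P := by unfold pvShape; simp
    have hne : (List.replicate F "fermini" ++ List.replicate P "pico") ≠ [] := by
      intro h
      apply hz
      simpa using congrArg List.length h
    rw [if_neg (by rw [hlenS]; exact hz), if_pos hne]
    unfold pvShape
    rfl
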